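-- pv_equiv track=rewrite | github.com/AkhlaqAltaf/SeedWild | src/recommendation/process_data/process.py | map_soil_to_number
-- ===== SOURCE A (Python) =====
-- def map_soil_to_number(soil):
--     soil_types = [
--         'Loamy', 'Sandy', 'Clay', 'Silt', 'Peaty', 'Muddy', 'Loam', 'Clayey', 'Rocky',
--         'Sandy loam', 'Well-drained', 'Moist', 'Silty', 'Clay loam', 'Silt loam',
--         'Swampy', 'Well-draining', 'Sandy Loam', 'Wet', 'Marshy', 'Boggy', 'Damp',
--         'Acidic', 'Silty loam', 'Epiphytic', 'Silty Loam', 'Loamy sand', 'Silty clay',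
--         'Dry', 'Epiphyte', 'Clay Loam', 'Alluvial', 'Humus', 'Peat', 'Slightly Acidic',
--         'Neutral', 'Humus-rich', 'Slightly acidic', 'Chalky', 'Volcanic loam',
--         'Laterite soil', 'Red soil', 'Alluvial soil', 'Silt Loam', 'Sandy Clay',
--         'Organic', 'Sedge', 'Sandy clay loam', 'Rich', 'Rich loamy soil',
--         'Sandy Clay Loam', 'Volcanic', 'Loamy soil'
--     ]
--
--     soil_categories = {soil: index for index, soil in enumerate(sorted(set(soil_types)))}
--     return soil_categories.get(soil)
-- ===== SOURCE B (Python) =====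
-- _SOIL_CSV = (
--     "Loamy,Sandy,Clay,Silt,Peaty,Muddy,Loam,Clayey,Rocky,"
--     "Sandy loam,Well-drained,Moist,Silty,Clay loam,Silt loam,"
--     "Swampy,Well-draining,Sandy Loam,Wet,Marshy,Boggy,Damp,"
--     "Acidic,Silty loam,Epiphytic,Silty Loam,Loamy sand,Silty clay,"
--     "Dry,Epiphyte,Clay Loam,Alluvial,Humus,Peat,Slightly Acidic,"
--     "Neutral,Humus-rich,Slightly acidic,Chalky,Volcanic loam,"
--     "Laterite soil,Red soil,Alluvial soil,Silt Loam,Sandy Clay,"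
--     "Organic,Sedge,Sandy clay loam,Rich,Rich loamy soil,"
--     "Sandy Clay Loam,Volcanic,Loamy soil"
-- )
--
-- _SOIL_SET = set(_SOIL_CSV.split(","))
--
--
-- def map_soil_to_number(soil):
--     # rank by counting: the index of soil in sorted(set(...)) is exactly the
--     # number of distinct soil types strictly smaller than it -- no sort needed
--     if soil not in _SOIL_SET:
--         return None
--     return sum(1 for t in _SOIL_SET if t < soil)
-- ===== Notes on version B (the rewrite author's own statement) =====
-- stated objective: alternative
-- what changed: Instead of sorting the deduplicated names and building an {name: index} dict per call, B keeps the names as one comma-separated constant split into a set once, and computes the rank directly by counting the distinct names strictly smaller than the query (rank-by-counting), returning None on a miss; no sort, no enumerate, no dict.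
import Mathlib
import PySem

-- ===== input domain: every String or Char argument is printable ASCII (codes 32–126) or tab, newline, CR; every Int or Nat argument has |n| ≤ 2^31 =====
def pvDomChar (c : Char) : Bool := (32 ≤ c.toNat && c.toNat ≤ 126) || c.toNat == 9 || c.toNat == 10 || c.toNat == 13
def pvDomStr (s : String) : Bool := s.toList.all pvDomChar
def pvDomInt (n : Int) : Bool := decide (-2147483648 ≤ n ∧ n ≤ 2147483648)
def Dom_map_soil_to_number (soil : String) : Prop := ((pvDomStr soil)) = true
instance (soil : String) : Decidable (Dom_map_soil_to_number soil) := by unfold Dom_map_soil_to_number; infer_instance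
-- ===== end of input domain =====

-- B replaces A's per-call sorted(set)+enumerate dict lookup by rank-by-counting over a
-- precomputed set (index = number of distinct names strictly smaller); objective: alternative.

-- ===== PORT A =====
-- A's literal soil_types list
def soilTypes : List String := [
    "Loamy", "Sandy", "Clay", "Silt", "Peaty", "Muddy", "Loam", "Clayey", "Rocky",
    "Sandy loam", "Well-drained", "Moist", "Silty", "Clay loam", "Silt loam",
    "Swampy", "Well-draining", "Sandy Loam", "Wet", "Marshy", "Boggy", "Damp",
    "Acidic", "Silty loam", "Epiphytic", "Silty Loam", "Loamy sand", "Silty clay",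
    "Dry", "Epiphyte", "Clay Loam", "Alluvial", "Humus", "Peat", "Slightly Acidic",
    "Neutral", "Humus-rich", "Slightly acidic", "Chalky", "Volcanic loam",
    "Laterite soil", "Red soil", "Alluvial soil", "Silt Loam", "Sandy Clay",
    "Organic", "Sedge", "Sandy clay loam", "Rich", "Rich loamy soil",
    "Sandy Clay Loam", "Volcanic", "Loamy soil"]

-- {soil: index for index, soil in enumerate(sorted(set(soil_types)))} ; return .get(soil)
def map_soil_to_number (soil : String) : Option Int :=
  let soil_categories : PySem.Dict String Int :=
    (PySem.List.enumerate (PySem.List.sorted (PySem.Set.ofList soilTypes) (fun x => x.toList) false) 0).foldl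
      (fun d p => d.insert p.2 p.1) PySem.Dict.empty
  soil_categories.get? soil

-- ===== PORT B =====
-- _SOIL_CSV: one comma-separated string constant (Source B stores the table this way)
def soilCSV : String := "Loamy,Sandy,Clay,Silt,Peaty,Muddy,Loam,Clayey,Rocky,Sandy loam,Well-drained,Moist,Silty,Clay loam,Silt loam,Swampy,Well-draining,Sandy Loam,Wet,Marshy,Boggy,Damp,Acidic,Silty loam,Epiphytic,Silty Loam,Loamy sand,Silty clay,Dry,Epiphyte,Clay Loam,Alluvial,Humus,Peat,Slightly Acidic,Neutral,Humus-rich,Slightly acidic,Chalky,Volcanic loam,Laterite soil,Red soil,Alluvial soil,Silt Loam,Sandy Clay,Organic,Sedge,Sandy clay loam,Rich,Rich loamy soil,Sandy Clay Loam,Volcanic,Loamy soil"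

-- _SOIL_SET = set(_SOIL_CSV.split(","))
def soilSet : PySem.Set String := PySem.Set.ofList ((PySem.Str.split? soilCSV ",").getD [])  -- split? = some for nonempty sep

-- if soil not in _SOIL_SET: return None ; return sum(1 for t in _SOIL_SET if t < soil)
def map_soil_to_number_alt (soil : String) : Option Int :=
  if PySem.Set.contains soilSet soil then
    some ((soilSet.filter (fun t => decide (t.toList < soil.toList))).length : Int)
  else
    none

-- ===== PRECONDITION & SPEC =====
def Spec_map_soil_to_number (soil : String) (out : Option Int) : Prop := out = map_soil_to_number_alt soil
instance (soil : String) (out : Option Int) : Decidable (Spec_map_soil_to_number soil out) := by unfold Spec_map_soil_to_number; infer_instance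

-- ===== CLAIM (what is proved, stated in full; the proofs are below) =====
def Claim_equal_map_soil_to_number : Prop := ∀ (soil : String), Dom_map_soil_to_number soil → Spec_map_soil_to_number soil (map_soil_to_number soil)

-- ===== LEMMAS AND PROOFS =====

-- sorted(set(soil_types)) as a literal (proof-side only)
def sortedSoil : List String := [
  "Acidic", "Alluvial", "Alluvial soil", "Boggy", "Chalky", "Clay", "Clay Loam",
  "Clay loam", "Clayey", "Damp", "Dry", "Epiphyte", "Epiphytic", "Humus", "Humus-rich",
  "Laterite soil", "Loam", "Loamy", "Loamy sand", "Loamy soil", "Marshy", "Moist",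
  "Muddy", "Neutral", "Organic", "Peat", "Peaty", "Red soil", "Rich", "Rich loamy soil",
  "Rocky", "Sandy", "Sandy Clay", "Sandy Clay Loam", "Sandy Loam", "Sandy clay loam",
  "Sandy loam", "Sedge", "Silt", "Silt Loam", "Silt loam", "Silty", "Silty Loam",
  "Silty clay", "Silty loam", "Slightly Acidic", "Slightly acidic", "Swampy",
  "Volcanic", "Volcanic loam", "Well-drained", "Well-draining", "Wet"]

set_option maxRecDepth 10000 in
theorem sorted_eq_lit :
    PySem.List.sorted (PySem.Set.ofList soilTypes) (fun x => x.toList) false = sortedSoil := by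
  decide

-- A returns none on a string not in the sorted list
theorem a_none_of_not_mem (soil : String) (h : soil ∉ sortedSoil) :
    map_soil_to_number soil = none := by
  unfold map_soil_to_number
  rw [PySem.Dict.get?_eq_none_iff_not_mem_keys]
  rw [show (fun (d : PySem.Dict String Int) (p : Int × String) => d.insert p.2 p.1)
        = (fun d p => d.insert ((fun (q : Int × String) => q.2) p) ((fun (_ : PySem.Dict String Int) (q : Int × String) => q.1) d p)) from rfl]
  rw [PySem.Dict.keys_foldl_insert_key]
  rw [PySem.List.map_snd_enumerate, sorted_eq_lit]
  intro hmem
  exact h (by simpa [PySem.Dict.empty, PySem.Set.update_nil_left, PySem.Set.mem_ofList] using hmem)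

-- every element of B's set is in sortedSoil, so B returns none off sortedSoil too
set_option maxHeartbeats 2000000 in
set_option maxRecDepth 100000 in
theorem soilSet_eq : soilSet = soilTypes := by decide

theorem alt_unfold (soil : String) :
    map_soil_to_number_alt soil
      = (if PySem.Set.contains soilTypes soil then
           some ((soilTypes.filter (fun t => decide (t.toList < soil.toList))).length : Int)
         else none) := by
  unfold map_soil_to_number_alt
  rw [soilSet_eq]

-- every element of the table is in sortedSoil, so B returns none off sortedSoil too
theorem soilTypes_subset : ∀ t ∈ soilTypes, t ∈ sortedSoil := by decide

theorem b_none_of_not_mem (soil : String) (h : soil ∉ sortedSoil) :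
    map_soil_to_number_alt soil = none := by
  rw [alt_unfold, if_neg]
  intro hc
  exact h (soilTypes_subset soil ((PySem.Set.contains_iff _ _).mp hc))

-- ===== VERDICT (by name: the statement is the Claim_ definition above) =====
set_option maxRecDepth 100000 in
set_option maxHeartbeats 2000000 in
theorem map_soil_to_number_spec : Claim_equal_map_soil_to_number := by
  intro soil _
  unfold Spec_map_soil_to_number
  by_cases h : soil ∈ sortedSoil
  · fin_cases h <;> rw [alt_unfold] <;> decide
  · rw [a_none_of_not_mem soil h, b_none_of_not_mem soil h]
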